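-- pv_equiv track=rewrite | github.com/dylan-buck/warhawk-toolkit | warhawk_toolkit/formats/ngp.py | calculate_texture_size
-- ===== SOURCE A (Python) =====
-- def calculate_texture_size(
--     width: int, height: int, num_mipmaps: int, compression: int
-- ) -> int:
--     """Calculate total texture data size including mipmaps."""
--     if compression == 0x06:  # DXT1
--         bytes_per_block = 8
--         pixels_per_block = 16
--     elif compression in (0x07, 0x08):  # DXT3/DXT5
--         bytes_per_block = 16
--         pixels_per_block = 16
--     else:  # Uncompressed (assume RGBA)
--         bytes_per_block = 4
--         pixels_per_block = 1
--
--     total_size = 0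
--     w, h = width, height
--
--     for _ in range(max(1, num_mipmaps)):
--         if compression in (0x06, 0x07, 0x08):
--             # DXT: 4x4 blocks
--             blocks_wide = max(1, (w + 3) // 4)
--             blocks_high = max(1, (h + 3) // 4)
--             level_size = blocks_wide * blocks_high * bytes_per_block
--         else:
--             level_size = w * h * bytes_per_block
--
--         total_size += level_size
--         w = max(1, w // 2)
--         h = max(1, h // 2)
--
--     return total_size
-- ===== SOURCE B (Python) =====
-- def calculate_texture_size(
--     width: int, height: int, num_mipmaps: int, compression: int
-- ) -> int:
--     """Stateless variant: level k's dimensions are computed directly from the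
--     originals as max(1, v // 2**k); loop only while a dimension exceeds 1,
--     then pay the remaining constant-cost levels in closed form."""
--     if compression == 0x06:
--         bpb, dxt = 8, True
--     elif compression in (0x07, 0x08):
--         bpb, dxt = 16, True
--     else:
--         bpb, dxt = 4, False
--
--     def dim(v, k):
--         return v if k == 0 else max(1, v // (1 << k))
--
--     n = max(1, num_mipmaps)
--     total = 0
--     k = 0
--     while k < n:
--         w, h = dim(width, k), dim(height, k)
--         if w == 1 and h == 1:
--             return total + (n - k) * bpb
--         if dxt:
--             total += max(1, (w + 3) // 4) * max(1, (h + 3) // 4) * bpb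
--         else:
--             total += w * h * bpb
--         k += 1
--     return total
-- ===== Notes on version B (the rewrite author's own statement) =====
-- stated objective: faster
-- what changed: B carries no (w,h) state: it computes level k's dimensions directly from the originals as max(1, v // 2**k), loops only while a dimension exceeds 1 (O(log) iterations) and returns the remaining levels' constant cost in closed form, instead of iterating all num_mipmaps levels with halved state.
import Mathlib
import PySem

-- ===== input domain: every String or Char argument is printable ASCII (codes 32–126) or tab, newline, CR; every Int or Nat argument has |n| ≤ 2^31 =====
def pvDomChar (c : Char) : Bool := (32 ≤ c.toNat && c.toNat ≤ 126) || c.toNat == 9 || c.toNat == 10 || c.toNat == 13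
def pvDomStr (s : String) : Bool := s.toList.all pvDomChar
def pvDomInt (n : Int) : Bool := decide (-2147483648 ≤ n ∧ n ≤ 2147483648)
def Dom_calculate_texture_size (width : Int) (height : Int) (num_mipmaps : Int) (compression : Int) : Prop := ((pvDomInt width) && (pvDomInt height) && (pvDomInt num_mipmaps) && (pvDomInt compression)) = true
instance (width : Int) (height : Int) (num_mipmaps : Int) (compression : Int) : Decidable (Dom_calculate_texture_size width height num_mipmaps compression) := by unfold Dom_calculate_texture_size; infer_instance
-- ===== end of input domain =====

-- B is faster: it computes each level's dimensions directly from the originals by a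
-- power-of-two division (no carried (w,h) state), stops looping once both dimensions
-- reach 1, and pays the remaining constant-cost levels in closed form (measured asymptotic change).
-- ===== PORT A =====
-- the loop body of A: one iteration per mipmap level, carrying (w, h, total)
def ctsA_loop (compression : Int) (bytes_per_block : Int) : Nat → Int → Int → Int → Int
  | 0, _, _, total => total
  | k+1, w, h, total =>
    let level_size :=
      if compression = 6 ∨ compression = 7 ∨ compression = 8 then
        (max 1 (PySem.Int.floordiv (w + 3) 4)) * (max 1 (PySem.Int.floordiv (h + 3) 4)) * bytes_per_block
      else
        w * h * bytes_per_block
    ctsA_loop compression bytes_per_block k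
      (max 1 (PySem.Int.floordiv w 2)) (max 1 (PySem.Int.floordiv h 2)) (total + level_size)

def calculate_texture_size (width : Int) (height : Int) (num_mipmaps : Int) (compression : Int) : Int :=
  let bytes_per_block : Int :=
    if compression = 6 then 8
    else if compression = 7 ∨ compression = 8 then 16
    else 4
  ctsA_loop compression bytes_per_block (max 1 num_mipmaps).toNat width height 0

-- ===== PORT B =====
-- dim(v, k) from Source B: level k's dimension, computed directly from the original value
def ctsB_dim (v : Int) (k : Nat) : Int :=
  if k = 0 then v else max 1 (PySem.Int.floordiv v (2 ^ k))

-- the while loop of Source B: fuel = n - k; early return with the closed-form tail at 1x1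
def ctsB_go (dxt : Bool) (bpb : Int) (width height : Int) : Nat → Nat → Int → Int
  | 0, _, total => total
  | r+1, k, total =>
    let w := ctsB_dim width k
    let h := ctsB_dim height k
    if w = 1 ∧ h = 1 then total + ((r : Int) + 1) * bpb
    else
      let lvl :=
        if dxt then
          (max 1 (PySem.Int.floordiv (w + 3) 4)) * (max 1 (PySem.Int.floordiv (h + 3) 4)) * bpb
        else
          w * h * bpb
      ctsB_go dxt bpb width height r (k+1) (total + lvl)

def calculate_texture_size_alt (width : Int) (height : Int) (num_mipmaps : Int) (compression : Int) : Int :=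
  let p : Int × Bool :=
    if compression = 6 then (8, true)
    else if compression = 7 ∨ compression = 8 then (16, true)
    else (4, false)
  ctsB_go p.2 p.1 width height (max 1 num_mipmaps).toNat 0 0

-- ===== PRECONDITION & SPEC =====
def Spec_calculate_texture_size (width : Int) (height : Int) (num_mipmaps : Int) (compression : Int) (out : Int) : Prop := out = calculate_texture_size_alt width height num_mipmaps compression
instance (width : Int) (height : Int) (num_mipmaps : Int) (compression : Int) (out : Int) : Decidable (Spec_calculate_texture_size width height num_mipmaps compression out) := by unfold Spec_calculate_texture_size; infer_instance

-- ===== CLAIM =====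
def Claim_equal_calculate_texture_size : Prop := ∀ (width : Int) (height : Int) (num_mipmaps : Int) (compression : Int), Dom_calculate_texture_size width height num_mipmaps compression → Spec_calculate_texture_size width height num_mipmaps compression (calculate_texture_size width height num_mipmaps compression)

-- ===== LEMMAS AND PROOFS =====

-- A's dimension sequence: iterate max(1, · // 2)
def iterA (v : Int) : Nat → Int
  | 0 => v
  | k+1 => max 1 (PySem.Int.floordiv (iterA v k) 2)

theorem iterA_eq_dim (v : Int) (k : Nat) : iterA v k = ctsB_dim v k := by
  induction k with
  | zero => simp [iterA, ctsB_dim]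
  | succ k ih =>
    rw [iterA, ih]
    rcases Nat.eq_zero_or_pos k with hk | hk
    · subst hk
      simp [ctsB_dim, pow_one]
    · have hk0 : k ≠ 0 := by omega
      have hd : (0:Int) < 2 ^ k := by positivity
      have hd' : (0:Int) < 2 ^ (k+1) := by positivity
      rw [ctsB_dim, if_neg hk0, ctsB_dim, if_neg (Nat.succ_ne_zero k)]
      rw [PySem.Int.floordiv_eq_ediv_of_pos hd, PySem.Int.floordiv_eq_ediv_of_pos hd']
      by_cases hxp : 1 ≤ v / 2 ^ k
      · rw [max_eq_right hxp, PySem.Int.floordiv_eq_ediv_of_pos (by norm_num : (0:Int) < 2)]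
        rw [Int.ediv_ediv_of_nonneg (le_of_lt hd), ← pow_succ]
      · have hx0 : v / 2 ^ k ≤ 0 := by omega
        rw [max_eq_left (by omega : v / 2 ^ k ≤ (1:Int)),
            show PySem.Int.floordiv 1 2 = 0 from by decide]
        have h1 := Int.mul_ediv_add_emod v (2 ^ k)
        have h2 := Int.emod_nonneg v (ne_of_gt hd)
        have h3 := Int.emod_lt_of_pos v hd
        have hvlt : v < 2 ^ (k+1) := by
          have hpow : (2:Int) ^ (k+1) = 2 * 2 ^ k := by rw [pow_succ]; ring
          nlinarith
        have htail : v / 2 ^ (k+1) < 1 := by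
          apply Int.ediv_lt_of_lt_mul hd'; omega
        rw [max_eq_left (by omega : v / 2 ^ (k+1) ≤ (1:Int))]
        simp

-- Once (w, h) = (1, 1), every level of A costs exactly bytes_per_block.
theorem ctsA_loop_one_one (c b : Int) (k : Nat) (t : Int) :
    ctsA_loop c b k 1 1 t = t + (k : Int) * b := by
  induction k generalizing t with
  | zero => simp [ctsA_loop]
  | succ k ih =>
    simp only [ctsA_loop, PySem.Int.floordiv]
    have h1 : (max 1 (Int.fdiv 1 2) : Int) = 1 := by decide
    have h2 : (max 1 (Int.fdiv (1 + 3) 4) : Int) = 1 := by decide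
    simp only [h1, h2]
    split_ifs <;> rw [ih] <;> push_cast <;> ring

theorem ctsA_eq_ctsB (c b w0 h0 : Int) (r k : Nat) (t : Int) :
    ctsA_loop c b r (iterA w0 k) (iterA h0 k) t =
      ctsB_go (decide (c = 6 ∨ c = 7 ∨ c = 8)) b w0 h0 r k t := by
  induction r generalizing k t with
  | zero => simp [ctsA_loop, ctsB_go]
  | succ r ih =>
    by_cases hd : ctsB_dim w0 k = 1 ∧ ctsB_dim h0 k = 1
    · rw [iterA_eq_dim, iterA_eq_dim, hd.1, hd.2, ctsA_loop_one_one]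
      simp only [ctsB_go, if_pos hd]
      push_cast; ring
    · simp only [ctsB_go, if_neg hd]
      simp only [ctsA_loop]
      rw [show max 1 (PySem.Int.floordiv (iterA w0 k) 2) = iterA w0 (k+1) from rfl,
          show max 1 (PySem.Int.floordiv (iterA h0 k) 2) = iterA h0 (k+1) from rfl]
      rw [ih]
      rw [iterA_eq_dim, iterA_eq_dim]
      by_cases hc : c = 6 ∨ c = 7 ∨ c = 8 <;> simp [hc]

-- ===== VERDICT =====
theorem calculate_texture_size_spec : Claim_equal_calculate_texture_size := by
  intro width height num_mipmaps compression _
  unfold Spec_calculate_texture_size calculate_texture_size calculate_texture_size_alt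
  by_cases h6 : compression = 6
  · subst h6
    simpa using ctsA_eq_ctsB 6 8 width height (max 1 num_mipmaps).toNat 0 0
  · by_cases h78 : compression = 7 ∨ compression = 8
    · have : (compression = 6 ∨ compression = 7 ∨ compression = 8) := Or.inr h78
      simp only [if_neg h6, if_pos h78]
      simpa [h6, h78] using ctsA_eq_ctsB compression 16 width height (max 1 num_mipmaps).toNat 0 0
    · have hc : ¬(compression = 6 ∨ compression = 7 ∨ compression = 8) := by tauto
      simp only [if_neg h6, if_neg h78]
      simpa [hc] using ctsA_eq_ctsB compression 4 width height (max 1 num_mipmaps).toNat 0 0
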